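-- pv_equiv track=rewrite | github.com/rameshaj/Hybrid-SDLC-Agents | src/step6_orchestrator_quixbugs_v5_attempts.py | _trim_hunk_trailing_context
-- ===== SOURCE A (Python) =====
-- from typing import Dict, Any, Optional, Tuple, List
--
-- def _trim_hunk_trailing_context(diff: str) -> Tuple[str, bool]:
--     lines = diff.splitlines()
--     fixed: List[str] = []
--     changed = False
--     i = 0
--
--     while i < len(lines):
--         line = lines[i]
--         if not line.startswith("@@ "):
--             fixed.append(line)
--             i += 1
--             continue
--
--         # Collect hunk body
--         hunk_header = line
--         hunk_body: List[str] = []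
--         i += 1
--         while i < len(lines):
--             l = lines[i]
--             if l.startswith("@@ ") or l.startswith("diff --git"):
--                 break
--             hunk_body.append(l)
--             i += 1
--
--         # Find last change line (+ or -)
--         last_change = None
--         for idx in range(len(hunk_body) - 1, -1, -1):
--             if hunk_body[idx].startswith(("+", "-")):
--                 last_change = idx
--                 break
--
--         if last_change is not None:
--             # Drop trailing context lines after last change
--             trimmed = hunk_body[: last_change + 1]
--             # Drop trailing blank-line additions (e.g., "+")
--             while trimmed and trimmed[-1].startswith("+") and trimmed[-1][1:].strip() == "":
--                 trimmed.pop()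
--                 changed = True
--             if len(trimmed) != len(hunk_body):
--                 changed = True
--             hunk_body = trimmed
--
--         fixed.append(hunk_header)
--         fixed.extend(hunk_body)
--
--     return "\n".join(fixed).strip() + "\n", changed
-- ===== SOURCE B (Python) =====
-- from typing import Tuple
--
--
-- def _trim_hunk_trailing_context(diff: str) -> Tuple[str, bool]:
--     # Single reversed pass: walk the lines from the end, holding the current
--     # region's suffix in two buffers (pend = candidate-dropped tail, body = kept
--     # part once the cut line is found); commit or restore when the region's
--     # opening boundary line ("@@ " header / "diff --git" / start) is reached.
--     out = []            # result lines, in reverse order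
--     body = []           # kept part of the current region (reverse order)
--     pend = []           # tail of the current region past the prospective cut (reverse order)
--     seen = False        # a "+"/"-" line was seen in the current region
--     cut = False         # the cut line (last kept line) was found
--     changed = False
--     for x in reversed(diff.splitlines()):
--         if x.startswith("@@ "):
--             # current region is this hunk's body: commit the trim
--             if not (cut or seen):
--                 out += pend          # no change line at all: hunk kept verbatim
--             changed = changed or (seen and bool(pend))
--             out += body
--             out.append(x)
--             body, pend, seen, cut = [], [], False, False
--         elif x.startswith("diff --git"):
--             # current region is not a hunk body: restore it verbatim
--             out += pend
--             out += body
--             out.append(x)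
--             body, pend, seen, cut = [], [], False, False
--         elif cut:
--             body.append(x)
--         else:
--             seen = seen or x.startswith(("+", "-"))
--             if seen and not (x.startswith("+") and x[1:].strip() == ""):
--                 cut = True
--                 body.append(x)
--             else:
--                 pend.append(x)
--     # region at the start of the file is never a hunk body: restore it
--     out += pend
--     out += body
--     return "\n".join(reversed(out)).strip() + "\n", changed
-- ===== Notes on version B (the rewrite author's own statement) =====
-- stated objective: alternative
-- what changed: A's forward two-level parse (collect each hunk body, find the last +/- line, slice, then pop trailing blank-plus lines) is replaced by one right-to-left pass over the lines: a state machine holds the current region's prospective-dropped tail and kept part in two reversed buffers, fuses the find-last-change and blank-pop steps into a single per-line cut test, and commits or restores the buffers when the region's opening boundary (hunk header, diff header, or start of file) is reached, building the output back-to-front.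
import Mathlib
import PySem

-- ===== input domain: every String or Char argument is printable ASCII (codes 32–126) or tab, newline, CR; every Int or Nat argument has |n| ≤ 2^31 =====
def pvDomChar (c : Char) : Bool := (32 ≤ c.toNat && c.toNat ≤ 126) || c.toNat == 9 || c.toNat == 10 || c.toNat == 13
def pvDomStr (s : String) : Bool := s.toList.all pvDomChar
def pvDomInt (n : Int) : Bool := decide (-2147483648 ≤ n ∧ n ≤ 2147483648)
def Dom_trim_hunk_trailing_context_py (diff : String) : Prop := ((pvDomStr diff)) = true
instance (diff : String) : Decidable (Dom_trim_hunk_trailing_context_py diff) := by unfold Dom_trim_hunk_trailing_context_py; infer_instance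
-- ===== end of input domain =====

-- B replaces A's forward two-level parse (collect hunk body, find last change, slice, pop
-- blank-'+' lines) by ONE right-to-left pass building the output back-to-front with
-- commit/restore buffers per region (objective: alternative, same O(n) cost).

-- ===== PORT A =====

-- inner `while i < len(lines)` collector: hunk body up to the next "@@ "/"diff --git", plus the rest
def pvCollectA : List String → List String × List String
  | [] => ([], [])
  | l :: ls =>
    if PySem.Str.startswith l "@@ " || PySem.Str.startswith l "diff --git" then ([], l :: ls)
    else
      let r := pvCollectA ls
      (l :: r.1, r.2)

-- cited by pvLoopA's decreasing_by
theorem pvCollectA_rest_le (ls : List String) : (pvCollectA ls).2.length ≤ ls.length := by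
  induction ls with
  | nil => simp [pvCollectA]
  | cons l ls ih =>
    simp only [pvCollectA]
    split
    · simp
    · simpa using Nat.le_succ_of_le ih

-- `for idx in range(len(hunk_body)-1, -1, -1): … break` scan
def pvFindLastA (body : List String) : List Int → Option Int
  | [] => none
  | idx :: rest =>
    if PySem.Str.startswith (PySem.List.pyGetD body idx "") "+"
        || PySem.Str.startswith (PySem.List.pyGetD body idx "") "-" then some idx
    else pvFindLastA body rest

-- `while trimmed and trimmed[-1].startswith("+") and trimmed[-1][1:].strip() == "": trimmed.pop(); changed = True`
def pvPopA : List String → Bool → List String × Bool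
  | [], ch => ([], ch)
  | t :: ts, ch =>
    if PySem.Str.startswith (PySem.List.pyGetD (t :: ts) (-1) "") "+"
        && (PySem.Str.strip (PySem.Str.slice (PySem.List.pyGetD (t :: ts) (-1) "") (some 1) none) == "") then
      pvPopA (t :: ts).dropLast true
    else (t :: ts, ch)
termination_by t _ => t.length
decreasing_by simp

-- the `if last_change is not None:` block of A
def pvHunkTrimA (body : List String) (ch : Bool) : List String × Bool :=
  match pvFindLastA body (PySem.List.pyRange ((body.length : Int) - 1) (-1) (-1)) with
  | none => (body, ch)
  | some lc =>
    let trimmed := PySem.List.slice body none (some (lc + 1))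
    let p := pvPopA trimmed ch
    (p.1, if p.1.length ≠ body.length then true else p.2)

-- the outer `while i < len(lines)` loop
def pvLoopA (lines : List String) (fixed : List String) (ch : Bool) : List String × Bool :=
  match lines with
  | [] => (fixed, ch)
  | l :: ls =>
    if !PySem.Str.startswith l "@@ " then pvLoopA ls (fixed ++ [l]) ch
    else
      let c := pvCollectA ls
      let r := pvHunkTrimA c.1 ch
      pvLoopA c.2 (fixed ++ [l] ++ r.1) r.2
termination_by lines.length
decreasing_by
  · simp
  · have := pvCollectA_rest_le ls; simp; omega

def trim_hunk_trailing_context_py (diff : String) : String × Bool :=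
  let r := pvLoopA (PySem.Str.splitlines diff) [] false
  (PySem.Str.strip (PySem.Str.join "\n" r.1) ++ "\n", r.2)

-- ===== PORT B =====

-- one step of Source B's reversed for-loop; state = (out, body, pend, seen, cut, changed)
def pvStepB (st : List String × List String × List String × Bool × Bool × Bool) (x : String) :
    List String × List String × List String × Bool × Bool × Bool :=
  match st with
  | (out, body, pend, seen, cut, changed) =>
    if PySem.Str.startswith x "@@ " then
      ((if !(cut || seen) then out ++ pend else out) ++ body ++ [x],
       [], [], false, false, changed || (seen && !pend.isEmpty))
    else if PySem.Str.startswith x "diff --git" then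
      (out ++ pend ++ body ++ [x], [], [], false, false, changed)
    else if cut then
      (out, body ++ [x], pend, seen, cut, changed)
    else
      let seen' := seen || (PySem.Str.startswith x "+" || PySem.Str.startswith x "-")
      if seen' && !(PySem.Str.startswith x "+"
          && (PySem.Str.strip (PySem.Str.slice x (some 1) none) == "")) then
        (out, body ++ [x], pend, seen', true, changed)
      else
        (out, body, pend ++ [x], seen', cut, changed)

def trim_hunk_trailing_context_py_alt (diff : String) : String × Bool :=
  match (PySem.Str.splitlines diff).reverse.foldl pvStepB ([], [], [], false, false, false) with
  | (out, body, pend, _, _, changed) =>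
    (PySem.Str.strip (PySem.Str.join "\n" (out ++ pend ++ body).reverse) ++ "\n", changed)

-- ===== PRECONDITION & SPEC =====
def Spec_trim_hunk_trailing_context_py (diff : String) (out : String × Bool) : Prop := out = trim_hunk_trailing_context_py_alt diff
instance (diff : String) (out : String × Bool) : Decidable (Spec_trim_hunk_trailing_context_py diff out) := by unfold Spec_trim_hunk_trailing_context_py; infer_instance

-- ===== CLAIM (what is proved, stated in full; the proofs are below) =====
def Claim_equal_trim_hunk_trailing_context_py : Prop := ∀ (diff : String), Dom_trim_hunk_trailing_context_py diff → Spec_trim_hunk_trailing_context_py diff (trim_hunk_trailing_context_py diff)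

-- ===== LEMMAS AND PROOFS =====

-- abbreviations for the three line predicates both programs test
def pvChg (l : String) : Bool := PySem.Str.startswith l "+" || PySem.Str.startswith l "-"
def pvBp (l : String) : Bool :=
  PySem.Str.startswith l "+" && (PySem.Str.strip (PySem.Str.slice l (some 1) none) == "")
def pvBdry (l : String) : Bool := PySem.Str.startswith l "@@ " || PySem.Str.startswith l "diff --git"

-- A's pop loop with the changed flag dropped (proof-level helper)
def pvPopB : List String → List String
  | [] => []
  | t :: ts =>
    if PySem.Str.rstrip (PySem.List.pyGetD (t :: ts) (-1) "") == "+" then pvPopB (t :: ts).dropLast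
    else t :: ts
termination_by t => t.length
decreasing_by simp

-- strip s == "" is "all whitespace"
theorem stripNil (cs : List Char) : PySem.Chars.strip cs = [] ↔ ∀ c ∈ cs, PySem.Chars.isspace c := by
  simp only [PySem.Chars.strip, PySem.Chars.rstrip, PySem.Chars.lstrip,
    List.reverse_eq_nil_iff, List.dropWhile_eq_nil_iff, List.mem_reverse]
  constructor
  · intro h c hc
    by_cases hs : PySem.Chars.isspace c
    · exact hs
    · have : c ∈ cs.takeWhile PySem.Chars.isspace ∨ c ∈ cs.dropWhile PySem.Chars.isspace := by
        rw [← List.mem_append, List.takeWhile_append_dropWhile]; exact hc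
      rcases this with h1 | h1
      · exact absurd (List.mem_takeWhile_imp h1) hs
      · exact h c h1
  · intro h c hc
    have : c ∈ cs := by
      have := List.takeWhile_append_dropWhile (p := PySem.Chars.isspace) (l := cs)
      rw [← this]; exact List.mem_append_right _ hc
    exact h c this

-- A's pop condition (`startswith "+" and l[1:].strip() == ""`) equals `l.rstrip() == "+"`, list level
theorem popCondList (cs : List Char) :
    (PySem.Chars.startswith cs ['+'] ∧ PySem.Chars.strip (PySem.List.slice cs (some 1) none) = []) ↔
    PySem.Chars.rstrip cs = ['+'] := by
  cases cs with
  | nil =>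
    simp [PySem.Chars.startswith, PySem.Chars.rstrip]
  | cons c tl =>
    rw [PySem.List.slice_from_one]
    simp only [List.tail_cons]
    constructor
    · rintro ⟨h1, h2⟩
      have hc : c = '+' := by
        have := h1; simp [PySem.Chars.startswith, List.isPrefixOf] at this; exact this.symm
      subst hc
      have hall : ∀ x ∈ tl, PySem.Chars.isspace x := (stripNil tl).mp h2
      simp only [PySem.Chars.rstrip, List.reverse_cons]
      rw [List.dropWhile_append]
      have h3 : tl.reverse.dropWhile PySem.Chars.isspace = [] := by
        rw [List.dropWhile_eq_nil_iff]; intro x hx; exact hall x (List.mem_reverse.mp hx)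
      simp [h3]
      decide
    · intro h
      simp only [PySem.Chars.rstrip, List.reverse_cons] at h
      rw [List.dropWhile_append] at h
      by_cases h3 : tl.reverse.dropWhile PySem.Chars.isspace = []
      · simp [h3] at h
        by_cases hs : PySem.Chars.isspace c
        · simp [hs] at h
        · simp [hs] at h
          subst h
          refine ⟨by simp [PySem.Chars.startswith, List.isPrefixOf], (stripNil tl).mpr ?_⟩
          intro x hx
          have := (List.dropWhile_eq_nil_iff).mp h3
          exact this x (List.mem_reverse.mpr hx)
      · simp [h3] at h

theorem pvPopCond (l : String) :
    (PySem.Str.startswith l "+"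
      && (PySem.Str.strip (PySem.Str.slice l (some 1) none) == "")) =
    (PySem.Str.rstrip l == "+") := by
  rw [Bool.eq_iff_iff]
  simp only [Bool.and_eq_true, beq_iff_eq]
  rw [← String.toList_inj, ← String.toList_inj]
  have hsw : (PySem.Str.startswith l "+" = true) ↔ PySem.Chars.startswith l.toList ['+'] = true := by
    simp [PySem.Str.startswith]
  rw [hsw]
  have h1 : (PySem.Str.strip (PySem.Str.slice l (some 1) none)).toList
      = PySem.Chars.strip (PySem.List.slice l.toList (some 1) none) := by
    simp [PySem.Str.toList_strip, PySem.Str.toList_slice]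
  have h2 : (PySem.Str.rstrip l).toList = PySem.Chars.rstrip l.toList := by
    simp [PySem.Str.toList_rstrip]
  rw [h1, h2]
  have := popCondList l.toList
  simpa using this

theorem pvBpCond (l : String) : pvBp l = (PySem.Str.rstrip l == "+") := pvPopCond l

theorem pvPopB_len_le (t : List String) : (pvPopB t).length ≤ t.length := by
  match t with
  | [] => simp [pvPopB]
  | x :: xs =>
    rw [pvPopB]
    split
    · exact le_trans (pvPopB_len_le (x :: xs).dropLast) (by simp)
    · exact le_refl _
termination_by t.length
decreasing_by simp

theorem pvPop_eq (t : List String) (ch : Bool) :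
    pvPopA t ch = (pvPopB t, ch || decide ((pvPopB t).length ≠ t.length)) := by
  match t with
  | [] => simp [pvPopA, pvPopB]
  | x :: xs =>
    rw [pvPopA, pvPopB, pvPopCond]
    split
    · rw [pvPop_eq (x :: xs).dropLast true]
      have hne : (pvPopB (x :: xs).dropLast).length ≠ (x :: xs).length := by
        have h1 := pvPopB_len_le (x :: xs).dropLast
        have h2 : (x :: xs).dropLast.length < (x :: xs).length := by simp
        omega
      simp only [List.length_cons] at hne
      simp
      exact Or.inr hne
    · simp
termination_by t.length
decreasing_by simp

theorem pvFindLastA_mem' {body : List String} {idxs : List Int} {lc : Int}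
    (h : pvFindLastA body idxs = some lc) : lc ∈ idxs := by
  induction idxs with
  | nil => simp [pvFindLastA] at h
  | cons i rest ih =>
    rw [pvFindLastA] at h
    split at h
    · simp at h; simp [h]
    · simp [ih h]

-- A's hunk-trim step in terms of the pure pop (changed = ch || "something was dropped")
theorem hunkA_eq (R : List String) (ch : Bool) :
    pvHunkTrimA R ch =
      match pvFindLastA R (PySem.List.pyRange ((R.length : Int) - 1) (-1) (-1)) with
      | none => (R, ch)
      | some lc =>
        (pvPopB (PySem.List.slice R none (some (lc + 1))),
         ch || decide ((pvPopB (PySem.List.slice R none (some (lc + 1)))).length ≠ R.length)) := by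
  unfold pvHunkTrimA
  cases h : pvFindLastA R (PySem.List.pyRange ((R.length : Int) - 1) (-1) (-1)) with
  | none => rfl
  | some lc =>
    simp only
    rw [pvPop_eq]
    have hlc : 0 ≤ lc := by
      have hm := pvFindLastA_mem' h
      rw [PySem.List.mem_pyRange_neg_one] at hm
      omega
    have htr : (PySem.List.slice R none (some (lc + 1))).length ≤ R.length := by
      rw [PySem.List.slice_to R (b := lc + 1) (by omega)]
      exact List.length_take_le' _ _
    have hpop := pvPopB_len_le (PySem.List.slice R none (some (lc + 1)))
    set t := pvPopB (PySem.List.slice R none (some (lc + 1))) with ht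
    by_cases hb : t.length = R.length
    · have h1 : R.length = (PySem.List.slice R none (some (lc + 1))).length := by omega
      simp [hb]
      intro h2
      exact absurd h1 h2
    · simp [hb]

-- ch-linearity of the hunk trim
def pvAK (R : List String) : List String := (pvHunkTrimA R false).1
def pvAF (R : List String) : Bool := (pvHunkTrimA R false).2

theorem hunk_lin (R : List String) (ch : Bool) :
    pvHunkTrimA R ch = (pvAK R, ch || pvAF R) := by
  unfold pvAK pvAF
  rw [hunkA_eq R ch, hunkA_eq R false]
  cases pvFindLastA R (PySem.List.pyRange ((R.length : Int) - 1) (-1) (-1)) <;> simp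

theorem pvFindLastA_congr (xs ys : List String) (idxs : List Int)
    (h : ∀ i ∈ idxs, PySem.List.pyGetD xs i "" = PySem.List.pyGetD ys i "") :
    pvFindLastA xs idxs = pvFindLastA ys idxs := by
  induction idxs with
  | nil => rfl
  | cons i rest ih =>
    simp only [pvFindLastA, h i (by simp)]
    split
    · rfl
    · exact ih (fun j hj => h j (by simp [hj]))

-- pvFindLastA over the descending range is `none` iff no change line
theorem findLast_none (R : List String) :
    pvFindLastA R (PySem.List.pyRange ((R.length : Int) - 1) (-1) (-1)) = none ↔
      R.any pvChg = false := by
  induction R using List.reverseRecOn with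
  | nil =>
    rw [PySem.List.pyRange_neg_one_eq_nil (by simp)]
    simp [pvFindLastA]
  | append_singleton R x ih =>
    have hlen : ((R ++ [x]).length : Int) - 1 = (R.length : Int) := by simp
    rw [hlen, PySem.List.pyRange_neg_one_cons (by omega)]
    have hget : PySem.List.pyGetD (R ++ [x]) ((R.length : Int)) "" = x := by
      rw [PySem.List.pyGetD_natCast]
      simp [List.getD]
    simp only [pvFindLastA, hget]
    by_cases hx : (PySem.Str.startswith x "+" || PySem.Str.startswith x "-") = true
    · rw [if_pos hx]
      have hchg : pvChg x = true := by simpa [pvChg] using hx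
      have hany : (R ++ [x]).any pvChg = true := by rw [List.any_append]; simp [hchg]
      simp [hany]
    · rw [if_neg hx]
      have hcongr : pvFindLastA (R ++ [x]) (PySem.List.pyRange ((R.length : Int) - 1) (-1) (-1))
          = pvFindLastA R (PySem.List.pyRange ((R.length : Int) - 1) (-1) (-1)) := by
        apply pvFindLastA_congr
        intro i hi
        rw [PySem.List.mem_pyRange_neg_one] at hi
        rw [PySem.List.pyGetD_of_nonneg _ _ (by omega), PySem.List.pyGetD_of_nonneg _ _ (by omega)]
        rw [List.getD_append]
        omega
      rw [hcongr, ih, List.any_append]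
      have : pvChg x = false := by simpa [pvChg] using hx
      simp [this]

-- the fused reversed scan of B, extracted: scanning r (a region's lines, last first)
-- with "change already seen" flag s, returns none (no cut) or (dropped tail, cut line, rest)
def pvScan : List String → Bool → Option (List String × String × List String)
  | [], _ => none
  | x :: r, s =>
    let s' := s || pvChg x
    if s' && !pvBp x then some ([], x, r)
    else (pvScan r s').map (fun p => (x :: p.1, p.2.1, p.2.2))

theorem pvScan_decomp : ∀ (r : List String) (s : Bool) (d : List String) (x : String) (t : List String),
    pvScan r s = some (d, x, t) → r = d ++ x :: t := by
  intro r
  induction r with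
  | nil => intro s d x t h; simp [pvScan] at h
  | cons y r ih =>
    intro s d x t h
    simp only [pvScan] at h
    split at h
    · simp only [Option.some.injEq, Prod.mk.injEq] at h
      obtain ⟨hd, hx, ht⟩ := h
      subst hd hx ht
      simp
    · cases hr : pvScan r (s || pvChg y) with
      | none => rw [hr] at h; simp at h
      | some p =>
        obtain ⟨d', x', t'⟩ := p
        rw [hr] at h
        simp only [Option.map_some, Option.some.injEq, Prod.mk.injEq] at h
        obtain ⟨hd, hx, ht⟩ := h
        subst hd hx ht
        simp [ih _ _ _ _ hr]

theorem pvScan_none_no_chg (r : List String) (h : ∀ l ∈ r, pvChg l = false) :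
    pvScan r false = none := by
  induction r with
  | nil => rfl
  | cons y r ih =>
    simp only [pvScan, h y (by simp)]
    simp [ih (fun l hl => h l (by simp [hl]))]

theorem pvScan_true (r : List String) :
    pvScan r true = match r.dropWhile pvBp with
      | [] => none
      | x :: t => some (r.takeWhile pvBp, x, t) := by
  induction r with
  | nil => rfl
  | cons y r ih =>
    by_cases hy : pvBp y
    · simp only [pvScan, Bool.true_or, hy, List.dropWhile_cons, List.takeWhile_cons, if_pos, ih]
      cases r.dropWhile pvBp <;> simp
    · simp only [pvScan, List.dropWhile_cons, List.takeWhile_cons]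
      simp [hy]

theorem pvScan_append (r : List String) (a : String) : ∀ (s : Bool),
    pvScan (r ++ [a]) s =
      match pvScan r s with
      | some (d, x, t) => some (d, x, t ++ [a])
      | none => if (s || r.any pvChg || pvChg a) && !pvBp a then some (r, a, []) else none := by
  induction r with
  | nil => intro s; simp [pvScan]
  | cons y r ih =>
    intro s
    simp only [List.cons_append, pvScan]
    by_cases hc : (s || pvChg y) && !pvBp y
    · simp [hc]
    · rw [if_neg hc, if_neg hc, ih (s || pvChg y)]
      cases hr : pvScan r (s || pvChg y) with
      | some p => simp
      | none =>
        have hor : (s || List.any (y :: r) pvChg || pvChg a)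
            = (s || pvChg y || r.any pvChg || pvChg a) := by
          rw [List.any_cons]
          rw [Bool.eq_iff_iff]
          simp only [Bool.or_eq_true]
          tauto
        rw [hor]
        by_cases h2 : (s || pvChg y || r.any pvChg || pvChg a) && !pvBp a
        · simp [h2]
        · simp [h2]

-- pvPopB drops the maximal blank-'+' suffix
theorem pvPopB_append (L : List String) (y : String) :
    pvPopB (L ++ [y]) = if pvBp y then pvPopB L else L ++ [y] := by
  rw [pvPopB.eq_def]
  split
  · rename_i heq; simp at heq
  · rename_i t ts heq
    rw [← heq]
    have hlast : PySem.List.pyGetD (L ++ [y]) (-1) "" = y :=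
      PySem.List.pyGetD_neg_one_append_singleton L y ""
    rw [hlast, List.dropLast_concat, ← pvBpCond]

theorem pvPopB_eq_dropWhile (L : List String) :
    pvPopB L = ((L.reverse).dropWhile pvBp).reverse := by
  induction L using List.reverseRecOn with
  | nil => simp [pvPopB]
  | append_singleton L y ih =>
    rw [pvPopB_append]
    by_cases hy : pvBp y
    · simp [hy, ih]
    · simp [hy]

-- THE per-hunk crux: A's find-last + slice + pop = B's fused reversed scan
-- a region with a cut has a change line
theorem pvScan_some_any (r : List String) (p : List String × String × List String)
    (h : pvScan r false = some p) : r.any pvChg = true := by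
  by_contra hc
  have hall : ∀ l ∈ r, pvChg l = false := fun l hl => by
    by_contra hne
    exact hc (List.any_eq_true.mpr ⟨l, hl, by simpa using hne⟩)
  rw [pvScan_none_no_chg r hall] at h
  simp at h

theorem cruxA (R : List String) (ch : Bool) :
    pvHunkTrimA R ch =
      match pvScan R.reverse false with
      | none => if R.any pvChg then ([], true) else (R, ch)
      | some (d, x, t) => (t.reverse ++ [x], ch || !d.isEmpty) := by
  induction R using List.reverseRecOn with
  | nil =>
    rw [hunkA_eq, PySem.List.pyRange_neg_one_eq_nil (by simp)]
    simp [pvFindLastA, pvScan]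
  | append_singleton R y ih =>
    rw [hunkA_eq]
    have hlen : ((R ++ [y]).length : Int) - 1 = (R.length : Int) := by simp
    rw [hlen, PySem.List.pyRange_neg_one_cons (by omega)]
    have hget : PySem.List.pyGetD (R ++ [y]) ((R.length : Int)) "" = y := by
      rw [PySem.List.pyGetD_natCast]
      simp [List.getD]
    simp only [pvFindLastA, hget]
    have hrev : (R ++ [y]).reverse = y :: R.reverse := by simp
    rw [hrev]
    by_cases hy : (PySem.Str.startswith y "+" || PySem.Str.startswith y "-") = true
    · rw [if_pos hy]
      dsimp only
      have hchg : pvChg y = true := by simpa [pvChg] using hy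
      have hsl : PySem.List.slice (R ++ [y]) none (some ((R.length : Int) + 1)) = R ++ [y] := by
        rw [PySem.List.slice_to _ (by omega)]
        have : ((R.length : Int) + 1).toNat = R.length + 1 := by omega
        rw [this]
        exact List.take_of_length_le (by simp)
      rw [hsl]
      by_cases hby : pvBp y = true
      · -- y is a blank "+" line: A pops it (and the blank suffix); B's scan skips it with seen = true
        have hscan : pvScan (y :: R.reverse) false =
            (pvScan R.reverse true).map (fun p => (y :: p.1, p.2.1, p.2.2)) := by
          simp only [pvScan, hchg, hby]
          simp
        rw [hscan, pvScan_true, pvPopB_eq_dropWhile]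
        have hdw : (R ++ [y]).reverse.dropWhile pvBp = R.reverse.dropWhile pvBp := by
          rw [hrev, List.dropWhile_cons, if_pos hby]
        rw [hdw]
        cases hd : R.reverse.dropWhile pvBp with
        | nil =>
          simp only [List.reverse_nil, List.length_nil]
          have hany : (R ++ [y]).any pvChg = true := by
            rw [List.any_append]; simp [hchg]
          simp [hany]
        | cons x t =>
          have hlt : ((x :: t).reverse).length ≠ (R ++ [y]).length := by
            have h1 : (R.reverse.dropWhile pvBp).length ≤ R.length := by
              have := List.length_dropWhile_le (p := pvBp) (l := R.reverse)
              simpa using this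
            rw [hd] at h1
            simp only [List.length_reverse, List.length_cons, List.length_append,
              List.length_cons, List.length_nil] at h1 ⊢
            omega
          have h1 := List.length_dropWhile_le (p := pvBp) (l := R.reverse)
          rw [hd] at h1
          simp only [List.length_cons, List.length_reverse] at h1
          simp only [List.reverse_cons]
          simp
          exact Or.inr (by omega)
      · -- y itself is the cut line: nothing is trimmed
        have hscan : pvScan (y :: R.reverse) false = some ([], y, R.reverse) := by
          simp only [pvScan, hchg, hby]
          simp
        rw [hscan, pvPopB_append, if_neg (by simp [hby])]
        simp
    · rw [if_neg hy]
      have hchg : pvChg y = false := by simpa [pvChg] using hy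
      have hcongr : pvFindLastA (R ++ [y]) (PySem.List.pyRange ((R.length : Int) - 1) (-1) (-1))
          = pvFindLastA R (PySem.List.pyRange ((R.length : Int) - 1) (-1) (-1)) := by
        apply pvFindLastA_congr
        intro i hi
        rw [PySem.List.mem_pyRange_neg_one] at hi
        rw [PySem.List.pyGetD_of_nonneg _ _ (by omega), PySem.List.pyGetD_of_nonneg _ _ (by omega)]
        rw [List.getD_append]
        omega
      rw [hcongr]
      have hscan : pvScan (y :: R.reverse) false =
          (pvScan R.reverse false).map (fun p => (y :: p.1, p.2.1, p.2.2)) := by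
        simp only [pvScan, hchg]
        simp
      rw [hscan]
      cases hsc : pvScan R.reverse false with
      | none =>
        simp only [Option.map_none]
        by_cases hAny : R.any pvChg = true
        · -- all of the hunk body is trimmed away; the extra context line y is dropped too
          cases hf : pvFindLastA R (PySem.List.pyRange ((R.length : Int) - 1) (-1) (-1)) with
          | none => rw [findLast_none] at hf; rw [hf] at hAny; exact absurd hAny (by simp)
          | some lc =>
            dsimp only
            have hpair := (hunkA_eq R ch).symm.trans (ih)
            rw [hf, hsc] at hpair
            simp only [hAny, if_pos] at hpair
            have hkept : pvPopB (PySem.List.slice R none (some (lc + 1))) = [] :=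
              congrArg Prod.fst hpair
            have hbnd : 0 ≤ lc ∧ lc ≤ (R.length : Int) - 1 := by
              have hm := pvFindLastA_mem' hf
              rw [PySem.List.mem_pyRange_neg_one] at hm
              omega
            have hsl2 : PySem.List.slice (R ++ [y]) none (some (lc + 1))
                = PySem.List.slice R none (some (lc + 1)) := by
              rw [PySem.List.slice_to _ (by omega), PySem.List.slice_to _ (by omega)]
              exact List.take_append_of_le_length (by omega)
            rw [hsl2, hkept]
            have hany2 : (R ++ [y]).any pvChg = true := by
              rw [List.any_append]; simp [hAny]
            simp [hany2]
        · have hf : pvFindLastA R (PySem.List.pyRange ((R.length : Int) - 1) (-1) (-1)) = none := by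
            rw [findLast_none]
            exact Bool.not_eq_true _ ▸ (by simpa using hAny)
          rw [hf]
          dsimp only
          have hany2 : (R ++ [y]).any pvChg = false := by
            rw [List.any_append]
            simp [hchg]
            exact by simpa using hAny
          simp [hany2]
      | some p =>
        obtain ⟨d, x, t⟩ := p
        simp only [Option.map_some]
        cases hf : pvFindLastA R (PySem.List.pyRange ((R.length : Int) - 1) (-1) (-1)) with
        | none =>
          rw [findLast_none] at hf
          have := pvScan_some_any R.reverse _ hsc
          rw [List.any_reverse] at this
          rw [this] at hf
          exact absurd hf (by simp)
        | some lc =>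
          dsimp only
          have hpair := (hunkA_eq R ch).symm.trans (ih)
          rw [hf, hsc] at hpair
          have hkept : pvPopB (PySem.List.slice R none (some (lc + 1))) = t.reverse ++ [x] :=
            congrArg Prod.fst hpair
          have hbnd : 0 ≤ lc ∧ lc ≤ (R.length : Int) - 1 := by
            have hm := pvFindLastA_mem' hf
            rw [PySem.List.mem_pyRange_neg_one] at hm
            omega
          have hsl2 : PySem.List.slice (R ++ [y]) none (some (lc + 1))
              = PySem.List.slice R none (some (lc + 1)) := by
            rw [PySem.List.slice_to _ (by omega), PySem.List.slice_to _ (by omega)]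
            exact List.take_append_of_le_length (by omega)
          rw [hsl2, hkept]
          have hRlen : R.length = d.length + t.length + 1 := by
            have := pvScan_decomp R.reverse false d x t hsc
            have h2 : R.reverse.length = (d ++ x :: t).length := by rw [← this]
            simp at h2
            omega
          simp
          exact Or.inr (by omega)

-- pvCollectA = takeWhile/dropWhile on the boundary predicate
theorem collect_eq (ls : List String) :
    pvCollectA ls = (ls.takeWhile (fun l => !pvBdry l), ls.dropWhile (fun l => !pvBdry l)) := by
  induction ls with
  | nil => rfl
  | cons l ls ih =>
    by_cases h1 : PySem.Chars.startswith l.toList ['@', '@', ' '] = true <;>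
      by_cases h2 : PySem.Chars.startswith l.toList ['d','i','f','f',' ','-','-','g','i','t'] = true <;>
        simp [pvCollectA, pvBdry, h1, h2, ih]

-- non-header lines pass through A's loop verbatim
theorem passThrough (R : List String) : ∀ (rest fixed : List String) (ch : Bool),
    (∀ l ∈ R, PySem.Str.startswith l "@@ " = false) →
    pvLoopA (R ++ rest) fixed ch = pvLoopA rest (fixed ++ R) ch := by
  induction R with
  | nil => intro rest fixed ch _; simp
  | cons l R ih =>
    intro rest fixed ch h
    have hl : PySem.Chars.startswith l.toList ['@','@',' '] = false := by
      simpa using h l (by simp)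
    rw [List.cons_append, pvLoopA]
    rw [if_pos (by simp [hl])]
    rw [ih rest (fixed ++ [l]) ch (fun x hx => h x (by simp [hx]))]
    simp

-- accumulator-linearity of A's loop
theorem pvLin (ls : List String) : ∀ (fixed : List String) (ch : Bool),
    pvLoopA ls fixed ch = (fixed ++ (pvLoopA ls [] false).1, ch || (pvLoopA ls [] false).2) := by
  match ls with
  | [] => intro fixed ch; simp [pvLoopA]
  | l :: ls' =>
    intro fixed ch
    rw [pvLoopA, pvLoopA]
    by_cases hh0 : PySem.Str.startswith l "@@ "
    · have hh : PySem.Chars.startswith l.toList ['@','@',' '] = true := by simpa using hh0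
      rw [if_neg (by simp [hh]), if_neg (by simp [hh])]
      dsimp only
      rw [hunk_lin, hunk_lin]
      rw [pvLin (pvCollectA ls').2 (fixed ++ [l] ++ pvAK (pvCollectA ls').1) (ch || pvAF (pvCollectA ls').1)]
      rw [pvLin (pvCollectA ls').2 ([] ++ [l] ++ pvAK (pvCollectA ls').1) (false || pvAF (pvCollectA ls').1)]
      simp [Bool.or_assoc]
    · have hh : PySem.Chars.startswith l.toList ['@','@',' '] = false := by
        simpa using (Bool.not_eq_true _).mp hh0
      rw [if_pos (by simp [hh]), if_pos (by simp [hh])]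
      rw [pvLin ls' (fixed ++ [l]) ch, pvLin ls' ([] ++ [l]) false]
      simp
termination_by ls.length
decreasing_by
  all_goals have := pvCollectA_rest_le ls'
  all_goals simp
  all_goals omega

-- the region part of B's state, as a function of the region's lines
def pvRegion (R : List String) : List String × List String × Bool × Bool :=
  match pvScan R.reverse false with
  | none => ([], R.reverse, R.reverse.any pvChg, false)
  | some (d, x, t) => (x :: t, d, true, true)

-- THE main invariant: B's fold state after the (reversed) lines ls
theorem mainInv (ls : List String) :
    ls.reverse.foldl pvStepB ([], [], [], false, false, false) =
      ((pvLoopA (ls.dropWhile (fun l => !pvBdry l)) [] false).1.reverse,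
       (pvRegion (ls.takeWhile (fun l => !pvBdry l))).1,
       (pvRegion (ls.takeWhile (fun l => !pvBdry l))).2.1,
       (pvRegion (ls.takeWhile (fun l => !pvBdry l))).2.2.1,
       (pvRegion (ls.takeWhile (fun l => !pvBdry l))).2.2.2,
       (pvLoopA (ls.dropWhile (fun l => !pvBdry l)) [] false).2) := by
  induction ls with
  | nil => simp [pvLoopA, pvRegion, pvScan]
  | cons a ls ih =>
    have hstep : (a :: ls).reverse.foldl pvStepB ([], [], [], false, false, false)
        = pvStepB (ls.reverse.foldl pvStepB ([], [], [], false, false, false)) a := by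
      rw [List.reverse_cons, List.foldl_append]
      rfl
    rw [hstep, ih]
    set T := ls.takeWhile (fun l => !pvBdry l) with hT
    set D := ls.dropWhile (fun l => !pvBdry l) with hD
    set O := (pvLoopA D [] false).1 with hO
    set C := (pvLoopA D [] false).2 with hC
    have hR0 : pvRegion [] = ([], [], false, false) := rfl
    by_cases h1 : PySem.Str.startswith a "@@ " = true
    · -- "@@ " header: commit the current region as this hunk's body
      have h1c : PySem.Chars.startswith a.toList ['@','@',' '] = true := by simpa using h1
      have hbd : pvBdry a = true := by simp [pvBdry, h1c]
      have htw : (a :: ls).takeWhile (fun l => !pvBdry l) = [] := by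
        simp [List.takeWhile_cons, hbd]
      have hdw : (a :: ls).dropWhile (fun l => !pvBdry l) = a :: ls := by
        simp [List.dropWhile_cons, hbd]
      rw [htw, hdw, hR0]
      have hA : pvLoopA (a :: ls) [] false
          = ([a] ++ pvAK T ++ O, pvAF T || C) := by
        rw [pvLoopA, if_neg (by simp [h1c])]
        dsimp only
        rw [collect_eq]
        dsimp only
        rw [hunk_lin, ← hT, ← hD]
        dsimp only
        rw [pvLin D ([] ++ [a] ++ pvAK T) (false || pvAF T), ← hO, ← hC]
        simp
      rw [hA]
      simp only [pvStepB]
      rw [if_pos h1]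
      have hAKF : (pvAK T, pvAF T) = pvHunkTrimA T false := by
        rw [hunk_lin]; simp
      rw [cruxA T false] at hAKF
      simp only [pvRegion]
      cases hsc : pvScan T.reverse false with
      | none =>
        rw [hsc] at hAKF
        dsimp only at hAKF ⊢
        by_cases hAny : T.any pvChg = true
        · rw [if_pos hAny] at hAKF
          have hK : pvAK T = [] := congrArg Prod.fst hAKF
          have hF : pvAF T = true := congrArg Prod.snd hAKF
          have hTne : T.reverse ≠ [] := by
            rcases List.any_eq_true.mp hAny with ⟨l, hl, _⟩
            simpa using List.ne_nil_of_mem hl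
          have hS : T.reverse.any pvChg = true := by simpa using hAny
          rw [hK, hF, hS]
          simp [hTne]
          exact Or.inr (fun h => hTne (by simp [h]))
        · have hAny' : T.any pvChg = false := by simpa using hAny
          rw [hAny'] at hAKF
          simp only [Bool.false_eq_true, if_false] at hAKF
          have hK : pvAK T = T := congrArg Prod.fst hAKF
          have hF : pvAF T = false := congrArg Prod.snd hAKF
          have hS : T.reverse.any pvChg = false := by simpa using hAny'
          rw [hK, hF, hS]
          simp
      | some p =>
        obtain ⟨d, x, t⟩ := p
        rw [hsc] at hAKF
        dsimp only at hAKF ⊢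
        have hK : pvAK T = t.reverse ++ [x] := congrArg Prod.fst hAKF
        have hF : pvAF T = (false || !d.isEmpty) := congrArg Prod.snd hAKF
        rw [hK, hF]
        simp [Bool.or_comm]
    · have h1c : PySem.Chars.startswith a.toList ['@','@',' '] = false := by
        simpa using (Bool.not_eq_true _).mp h1
      by_cases h2 : PySem.Str.startswith a "diff --git" = true
      · -- "diff --git": the current region is kept verbatim
        have h2c : PySem.Chars.startswith a.toList ['d','i','f','f',' ','-','-','g','i','t'] = true := by
          simpa using h2
        have hbd : pvBdry a = true := by simp [pvBdry, h2c]
        have htw : (a :: ls).takeWhile (fun l => !pvBdry l) = [] := by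
          simp [List.takeWhile_cons, hbd]
        have hdw : (a :: ls).dropWhile (fun l => !pvBdry l) = a :: ls := by
          simp [List.dropWhile_cons, hbd]
        rw [htw, hdw, hR0]
        have hTnohdr : ∀ l ∈ T, PySem.Str.startswith l "@@ " = false := by
          intro l hl
          have := List.mem_takeWhile_imp (hT ▸ hl)
          simp only [Bool.not_eq_eq_eq_not, Bool.not_true] at this
          simp [pvBdry] at this
          simpa using this.1
        have hA : pvLoopA (a :: ls) [] false = ([a] ++ T ++ O, C) := by
          rw [pvLoopA, if_pos (by simp [h1c])]
          have hls : ls = T ++ D := (List.takeWhile_append_dropWhile).symm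
          rw [hls] at *
          rw [passThrough T D ([] ++ [a]) false hTnohdr]
          rw [pvLin D ([] ++ [a] ++ T) false, ← hO, ← hC]
          simp
        rw [hA]
        simp only [pvStepB]
        rw [if_neg h1, if_pos h2]
        simp only [pvRegion]
        cases hsc : pvScan T.reverse false with
        | none =>
          dsimp only
          simp
        | some p =>
          obtain ⟨d, x, t⟩ := p
          dsimp only
          have hTrev : T.reverse = d ++ x :: t := pvScan_decomp T.reverse false d x t hsc
          simp [hTrev]
      · -- ordinary line: it joins the current region
        have h2c : PySem.Chars.startswith a.toList ['d','i','f','f',' ','-','-','g','i','t'] = false := by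
          simpa using (Bool.not_eq_true _).mp h2
        have hbd : pvBdry a = false := by simp [pvBdry, h1c, h2c]
        have htw : (a :: ls).takeWhile (fun l => !pvBdry l) = a :: T := by
          simp [List.takeWhile_cons, hbd, hT]
        have hdw : (a :: ls).dropWhile (fun l => !pvBdry l) = D := by
          simp [List.dropWhile_cons, hbd, hD]
        rw [htw, hdw]
        simp only [pvStepB]
        rw [if_neg h1, if_neg h2]
        simp only [pvRegion, List.reverse_cons, pvScan_append]
        cases hsc : pvScan T.reverse false with
        | some p =>
          obtain ⟨d, x, t⟩ := p
          dsimp only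
          simp
          exact ⟨hO, hC⟩
        | none =>
          dsimp only
          have hchg : (PySem.Str.startswith a "+" || PySem.Str.startswith a "-") = pvChg a := rfl
          have hbp : (PySem.Str.startswith a "+"
              && (PySem.Str.strip (PySem.Str.slice a (some 1) none) == "")) = pvBp a := rfl
          rw [hchg, hbp]
          simp only [Bool.false_or]
          by_cases hcnd : ((T.reverse.any pvChg || pvChg a) && !pvBp a) = true
          · have hseen : (T.reverse.any pvChg || pvChg a) = true := by
              cases h' : (T.reverse.any pvChg || pvChg a)
              · rw [h'] at hcnd; simp at hcnd
              · rfl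
            have hbpf : pvBp a = false := by
              cases h' : pvBp a
              · rfl
              · rw [h'] at hcnd; simp at hcnd
            simp only [hcnd, hseen, Bool.false_eq_true, if_false, if_true]
            simp [hbpf]
            exact ⟨hO, hC⟩
          · have hcnd' : ((T.reverse.any pvChg || pvChg a) && !pvBp a) = false := by
              simpa using hcnd
            simp only [hcnd', Bool.false_eq_true, if_false]
            simp [List.any_append]
            exact ⟨hO, hC⟩

-- ===== VERDICT (by name: the statement is the Claim_ definition above) =====
theorem trim_hunk_trailing_context_py_spec : Claim_equal_trim_hunk_trailing_context_py := by
  intro diff _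
  unfold Spec_trim_hunk_trailing_context_py trim_hunk_trailing_context_py trim_hunk_trailing_context_py_alt
  dsimp only
  rw [mainInv (PySem.Str.splitlines diff)]
  set ls := PySem.Str.splitlines diff with hls
  set T := ls.takeWhile (fun l => !pvBdry l) with hT
  set D := ls.dropWhile (fun l => !pvBdry l) with hD
  have hTnohdr : ∀ l ∈ T, PySem.Str.startswith l "@@ " = false := by
    intro l hl
    have := List.mem_takeWhile_imp (hT ▸ hl)
    simp only [Bool.not_eq_eq_eq_not, Bool.not_true] at this
    simp [pvBdry] at this
    simpa using this.1
  have hA : pvLoopA ls [] false = (T ++ (pvLoopA D [] false).1, (pvLoopA D [] false).2) := by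
    conv_lhs => rw [show ls = T ++ D from (List.takeWhile_append_dropWhile).symm]
    rw [passThrough T D [] false hTnohdr, pvLin D ([] ++ T) false]
    simp
  rw [hA]
  simp only [pvRegion]
  cases hsc : pvScan T.reverse false with
  | none =>
    dsimp only
    simp
  | some p =>
    obtain ⟨d, x, t⟩ := p
    dsimp only
    have hTrev : T.reverse = d ++ x :: t := pvScan_decomp T.reverse false d x t hsc
    have hTeq : T = (x :: t).reverse ++ d.reverse := by
      have := congrArg List.reverse hTrev
      simpa using this
    simp [hTeq]
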